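-- pv_equiv track=rewrite | github.com/bandpooja/Assignment_3 | utils/evaluation.py | prepare_dict_for_evaluation
-- ===== SOURCE A (Python) =====
-- def prepare_dict_for_evaluation(res):
--     """
--         Converts the dictonary to be passed to PyTrec eval
--
--         :param res: a dictonary with words
--         :return: same in passable format to the PyTrec eval
--     """
--     res_for_eval = {}
--     for k in res.keys():
--         dict_ = {}
--         sorted_gt = [(k, v) for k, v in sorted(res.get(k).items(), key=lambda item: item[1])]
--         for idx, l in enumerate(sorted_gt[:10]):
--             dict_[l[0]] = 1
--         res_for_eval[k] = dict_
--     return res_for_eval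
-- ===== SOURCE B (Python) =====
-- def _insert_sorted(best, item):
--     # insert item before the first element strictly greater on (value, idx)
--     for i, b in enumerate(best):
--         if item[:2] < b[:2]:
--             return best[:i] + [item] + best[i:]
--     return best + [item]
--
--
-- def prepare_dict_for_evaluation(res):
--     """
--         Converts the dictonary to be passed to PyTrec eval, keeping for each
--         key the 10 smallest-valued inner entries (earliest-inserted wins ties),
--         selected in one pass with a bounded sorted buffer instead of a full sort.
--     """
--     out = {}
--     for k, inner in res.items():
--         best = []  # at most 10 triples (value, idx, innerkey), ascending by (value, idx)
--         for idx, (ik, v) in enumerate(inner.items()):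
--             best = _insert_sorted(best, (v, idx, ik))[:10]
--         out[k] = {t[2]: 1 for t in best}
--     return out
-- ===== Notes on version B (the rewrite author's own statement) =====
-- stated objective: alternative
-- what changed: Per key, B selects the 10 smallest-valued inner entries in one pass with a bounded (size-10) sorted buffer keyed by (value, insertion index) instead of fully sorting all inner items and slicing the first 10.
import Mathlib
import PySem

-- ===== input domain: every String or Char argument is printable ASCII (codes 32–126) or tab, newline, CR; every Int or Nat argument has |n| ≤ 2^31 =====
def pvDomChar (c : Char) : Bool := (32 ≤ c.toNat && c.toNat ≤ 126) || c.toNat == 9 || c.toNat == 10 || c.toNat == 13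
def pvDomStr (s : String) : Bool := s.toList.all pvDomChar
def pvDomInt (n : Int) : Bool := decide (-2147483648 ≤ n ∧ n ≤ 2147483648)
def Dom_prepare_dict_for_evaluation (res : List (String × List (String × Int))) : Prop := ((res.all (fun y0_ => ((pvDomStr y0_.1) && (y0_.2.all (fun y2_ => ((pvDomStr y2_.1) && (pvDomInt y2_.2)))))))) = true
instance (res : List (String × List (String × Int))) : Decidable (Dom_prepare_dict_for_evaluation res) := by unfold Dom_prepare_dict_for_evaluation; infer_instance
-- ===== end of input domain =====

-- B replaces A's per-key full sort + slice by a one-pass bounded (size-10) sorted buffer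
-- keyed by (value, insertion index); same return value, alternative algorithm.

-- ===== PORT A =====
-- inner body of A's loop: sort items by value (stable), take the first 10, map each key to 1
def pvSelA (its : List (String × Int)) : List (String × Int) :=
  let sorted_gt := PySem.List.sorted its (fun item => item.2)
  ((PySem.List.enumerate (PySem.List.slice sorted_gt none (some 10))).foldl
    (fun (d_ : PySem.Dict String Int) l => d_.insert l.2.1 1) PySem.Dict.empty).items

def prepare_dict_for_evaluation (res : List (String × List (String × Int))) : List (String × List (String × Int)) :=
  let d := PySem.Dict.ofList res
  (d.keys.foldl
    (fun (acc : PySem.Dict String (List (String × Int))) k =>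
      acc.insert k (pvSelA (PySem.Dict.ofList (d.getD k [])).items))
    PySem.Dict.empty).items

-- ===== PORT B =====
-- _insert_sorted: insert before the first element strictly greater on (value, idx)
def pvInsB (x : Int × Int × String) : List (Int × Int × String) → List (Int × Int × String)
  | [] => [x]
  | y :: ys => if x.1 < y.1 ∨ (x.1 = y.1 ∧ x.2.1 < y.2.1) then x :: y :: ys else y :: pvInsB x ys

-- inner body of B's loop: one pass keeping the ≤10 smallest (value, idx, key) triples; [:10] on a
-- nonnegative bound is List.take 10 (exact)
def pvSelB (its : List (String × Int)) : List (String × Int) :=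
  let best := (PySem.List.enumerate its).foldl
    (fun best p => (pvInsB (p.2.2, p.1, p.2.1) best).take 10) []
  (PySem.Dict.ofList (best.map (fun t => (t.2.2, (1 : Int))))).items

def prepare_dict_for_evaluation_alt (res : List (String × List (String × Int))) : List (String × List (String × Int)) :=
  ((PySem.Dict.ofList res).items.foldl
    (fun (acc : PySem.Dict String (List (String × Int))) p =>
      acc.insert p.1 (pvSelB (PySem.Dict.ofList p.2).items))
    PySem.Dict.empty).items

-- ===== PRECONDITION & SPEC =====
def Spec_prepare_dict_for_evaluation (res : List (String × List (String × Int))) (out : List (String × List (String × Int))) : Prop := out = prepare_dict_for_evaluation_alt res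
instance (res : List (String × List (String × Int))) (out : List (String × List (String × Int))) : Decidable (Spec_prepare_dict_for_evaluation res out) := by unfold Spec_prepare_dict_for_evaluation; infer_instance

-- ===== CLAIM (what is proved, stated in full; the proofs are below) =====
def Claim_equal_prepare_dict_for_evaluation : Prop := ∀ (res : List (String × List (String × Int))), Dom_prepare_dict_for_evaluation res → Spec_prepare_dict_for_evaluation res (prepare_dict_for_evaluation res)

-- ===== LEMMAS AND PROOFS =====

-- truncating the buffer at every step is the same as truncating once at the end
theorem pvInsB_take (x : Int × Int × String) (l : List (Int × Int × String)) (n : Nat) :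
    (pvInsB x (l.take n)).take n = (pvInsB x l).take n := by
  induction l generalizing n with
  | nil => simp [pvInsB]
  | cons y ys ih =>
    cases n with
    | zero => simp
    | succ m =>
      simp only [List.take_succ_cons, pvInsB]
      split_ifs with h
      · cases m with
        | zero => simp
        | succ k =>
          simp only [List.take_succ_cons, List.take_take]
          have : min k (k + 1) = k := by omega
          rw [this]
      · simp only [List.take_succ_cons, ih]

theorem pvLoop_take (l : List (Int × Int × String)) (acc : List (Int × Int × String)) :
    l.foldl (fun b x => (pvInsB x b).take 10) (acc.take 10)
      = (l.foldl (fun b x => pvInsB x b) acc).take 10 := by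
  induction l generalizing acc with
  | nil => simp
  | cons x xs ih =>
    simp only [List.foldl_cons]
    rw [pvInsB_take, ih]

-- with fresh (strictly larger) indices, the (value, idx) insertion is the value-only stable insertion
theorem pvInsB_fresh (x : Int × Int × String) (acc : List (Int × Int × String))
    (h : ∀ y ∈ acc, y.2.1 < x.2.1) :
    pvInsB x acc = PySem.List.insertBy (fun a b => decide (a.1 < b.1)) x acc := by
  induction acc with
  | nil => rfl
  | cons y ys ih =>
    have hy := h y (List.mem_cons_self)
    by_cases hlt : x.1 < y.1
    · simp [pvInsB, PySem.List.insertBy, hlt]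
    · have hno : ¬(x.1 < y.1 ∨ (x.1 = y.1 ∧ x.2.1 < y.2.1)) := by
        rintro (h1 | ⟨h1, h2⟩)
        · exact hlt h1
        · omega
      simp only [pvInsB, PySem.List.insertBy]
      rw [if_neg hno, if_neg (by simpa using hlt),
        ih (fun z hz => h z (List.mem_cons_of_mem _ hz))]

theorem pvFold_fresh (its : List (String × Int)) (j : Int) (acc : List (Int × Int × String))
    (h : ∀ y ∈ acc, y.2.1 < j) :
    ((PySem.List.enumerate its j).map (fun p => (p.2.2, p.1, p.2.1))).foldl
        (fun b x => pvInsB x b) acc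
      = ((PySem.List.enumerate its j).map (fun p => (p.2.2, p.1, p.2.1))).foldl
        (fun b x => PySem.List.insertBy (fun a b => decide (a.1 < b.1)) x b) acc := by
  induction its generalizing j acc with
  | nil => simp [PySem.List.enumerate]
  | cons p rest ih =>
    rw [PySem.List.enumerate_cons]
    simp only [List.map_cons, List.foldl_cons]
    rw [pvInsB_fresh (p.2, j, p.1) acc (fun y hy => h y hy)]
    exact ih (j + 1) _ (by
      intro y hy
      rcases (PySem.List.mem_insertBy _ _ _ _).1 hy with rfl | hy
      · show j < j + 1; omega
      · have := h y hy; omega)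

-- stripping the index commutes with value-keyed insertion
theorem pvStrip_insertBy (x : Int × Int × String) (l : List (Int × Int × String)) :
    (PySem.List.insertBy (fun a b => decide (a.1 < b.1)) x l).map (fun t => (t.2.2, t.1))
      = PySem.List.insertBy (fun a b => decide (a.2 < b.2)) (x.2.2, x.1)
          (l.map (fun t => (t.2.2, t.1))) := by
  induction l with
  | nil => rfl
  | cons y ys ih =>
    by_cases hlt : x.1 < y.1
    · simp [PySem.List.insertBy, hlt]
    · simp [PySem.List.insertBy, hlt, ih]

theorem pvStrip_fold (l : List (Int × Int × String)) (acc : List (Int × Int × String)) :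
    (l.foldl (fun b x => PySem.List.insertBy (fun a b => decide (a.1 < b.1)) x b) acc).map
        (fun t => (t.2.2, t.1))
      = (l.map (fun t => (t.2.2, t.1))).foldl
          (fun b x => PySem.List.insertBy (fun a b => decide (a.2 < b.2)) x b)
          (acc.map (fun t => (t.2.2, t.1))) := by
  induction l generalizing acc with
  | nil => rfl
  | cons x xs ih =>
    simp only [List.foldl_cons, List.map_cons]
    rw [ih, pvStrip_insertBy]

theorem pvStrip_enum (its : List (String × Int)) (j : Int) :
    ((PySem.List.enumerate its j).map (fun p => (p.2.2, p.1, p.2.1))).map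
        (fun t => (t.2.2, t.1)) = its := by
  induction its generalizing j with
  | nil => rfl
  | cons p rest ih => simp [PySem.List.enumerate_cons, ih]

-- A's dict-building fold ignores the enumeration index
theorem pvEnumFold (ts : List (String × Int)) (j : Int) (d : PySem.Dict String Int) :
    (PySem.List.enumerate ts j).foldl (fun d_ l => d_.insert l.2.1 1) d
      = ts.foldl (fun d_ l => d_.insert l.1 (1 : Int)) d := by
  induction ts generalizing j d with
  | nil => rfl
  | cons p rest ih => simp [PySem.List.enumerate_cons, ih]

-- the two inner-loop bodies agree on every items list
theorem pvSel_eq (its : List (String × Int)) : pvSelA its = pvSelB its := by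
  have hbest : ((PySem.List.enumerate its).foldl
      (fun best p => (pvInsB (p.2.2, p.1, p.2.1) best).take 10)
      ([] : List (Int × Int × String))).map (fun t => (t.2.2, t.1))
      = (PySem.List.sorted its (fun item => item.2)).take 10 := by
    have h1 := List.foldl_map (f := fun p : Int × String × Int => (p.2.2, p.1, p.2.1))
      (g := fun (b : List (Int × Int × String)) x => (pvInsB x b).take 10)
      (l := PySem.List.enumerate its) (init := ([] : List (Int × Int × String)))
    rw [← h1]
    have h2 := pvLoop_take ((PySem.List.enumerate its).map (fun p => (p.2.2, p.1, p.2.1))) []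
    simp only [List.take_nil] at h2
    rw [h2, pvFold_fresh its 0 [] (by intro y hy; cases hy), List.map_take, pvStrip_fold,
      pvStrip_enum, List.map_nil, PySem.List.sorted_eq_foldl_insertBy]
  simp only [pvSelA, pvSelB]
  rw [PySem.List.slice_to _ (by norm_num : (0 : Int) ≤ 10)]
  have h10 : Int.toNat 10 = 10 := rfl
  rw [h10, pvEnumFold, ← hbest, List.foldl_map]
  congr 1
  simp only [PySem.Dict.ofList, PySem.Dict.update]
  rw [List.foldl_map]

-- ===== VERDICT (by name: the statement is the Claim_ definition above) =====
theorem prepare_dict_for_evaluation_spec : Claim_equal_prepare_dict_for_evaluation := by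
  intro res _
  unfold Spec_prepare_dict_for_evaluation
  simp only [prepare_dict_for_evaluation, prepare_dict_for_evaluation_alt]
  congr 1
  rw [show (PySem.Dict.ofList res).keys
        = (PySem.Dict.ofList res).items.map (fun p => p.1) from rfl,
      List.foldl_map]
  exact PySem.List.foldl_congr_mem _ _ _ _ (fun acc p hp => by
    rw [PySem.Dict.getD_of_mem_items _ (k := p.1) (v := p.2) (by simpa using hp)
          (PySem.Dict.nodup_keys_ofList res) [],
        pvSel_eq])
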